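-- pv_equiv track=rewrite | github.com/Gefoks/telegram-nardi-bot1 | main.py | can_bear_off
-- ===== SOURCE A (Python) =====
-- START_PIECES = 15
--
-- def can_bear_off(points, player) -> bool:
--     if player == 1:
--         home = range(0,6)
--     else:
--         home = range(18,24)
--     total = 0
--     for i,(owner,cnt) in enumerate(points):
--         if owner == player:
--             total += cnt
--             if i not in home:
--                 return False
--     return total == START_PIECES
-- ===== SOURCE B (Python) =====
-- START_PIECES = 15
--
-- def can_bear_off(points, player) -> bool:
--     # Partition the board by slicing instead of testing each index against the
--     # home range: any player-owned point outside the home slice forbids bearing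
--     # off; otherwise the player's pieces are exactly those in the home slice.
--     lo, hi = (0, 6) if player == 1 else (18, 24)
--     outside = points[:lo] + points[hi:]
--     if any(owner == player for owner, _ in outside):
--         return False
--     return sum(cnt for owner, cnt in points[lo:hi] if owner == player) == START_PIECES
-- ===== Notes on version B (the rewrite author's own statement) =====
-- stated objective: alternative
-- what changed: Replaces the indexed early-returning loop (enumerate + per-index range membership + running total) by a slice-based partition of the board: B slices out the home segment, rejects if the player owns anything in the two outside slices, and otherwise sums the player's counts in the home slice only.
import Mathlib
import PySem

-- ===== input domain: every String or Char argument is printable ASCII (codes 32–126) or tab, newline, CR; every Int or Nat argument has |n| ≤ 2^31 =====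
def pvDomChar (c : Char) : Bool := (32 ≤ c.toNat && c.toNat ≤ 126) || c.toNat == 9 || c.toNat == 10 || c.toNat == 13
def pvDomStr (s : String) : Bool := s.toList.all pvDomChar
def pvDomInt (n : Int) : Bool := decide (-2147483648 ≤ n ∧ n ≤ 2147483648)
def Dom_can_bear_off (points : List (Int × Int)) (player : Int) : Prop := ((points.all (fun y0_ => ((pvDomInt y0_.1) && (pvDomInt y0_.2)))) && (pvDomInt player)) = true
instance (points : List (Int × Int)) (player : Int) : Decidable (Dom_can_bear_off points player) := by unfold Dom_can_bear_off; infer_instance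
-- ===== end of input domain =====

-- B replaces A's indexed early-returning loop by a slice-based partition of the board
-- (outside slices must hold none of the player's pieces; the home slice must sum to 15) — alternative decomposition.


-- ===== PORT A =====
-- 'i in home' for home = range(0,6) or range(18,24)
def pvHomeA (player : Int) (i : Int) : Bool :=
  if player == 1 then decide (0 ≤ i ∧ i < 6) else decide (18 ≤ i ∧ i < 24)

-- the for-loop over enumerate(points) with running index i and accumulator total,
-- early-returning False on an out-of-home owned point
def pvLoopA (player : Int) : List (Int × Int) → Int → Int → Bool
  | [], _, total => total == 15
  | (owner, cnt) :: rest, i, total =>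
    if owner == player then
      if pvHomeA player i then pvLoopA player rest (i + 1) (total + cnt)
      else false
    else pvLoopA player rest (i + 1) total

def can_bear_off (points : List (Int × Int)) (player : Int) : Bool :=
  pvLoopA player points 0 0

-- ===== PORT B =====
def can_bear_off_alt (points : List (Int × Int)) (player : Int) : Bool :=
  let lh : Int × Int := if player == 1 then (0, 6) else (18, 24)
  let outside := PySem.List.slice points none (some lh.1) ++ PySem.List.slice points (some lh.2) none
  if outside.any (fun p => p.1 == player) then false
  else (((PySem.List.slice points (some lh.1) (some lh.2)).filter (fun p => p.1 == player)).foldl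
      (fun s p => s + p.2) 0) == 15

-- ===== PRECONDITION & SPEC =====
def Spec_can_bear_off (points : List (Int × Int)) (player : Int) (out : Bool) : Prop := out = can_bear_off_alt points player
instance (points : List (Int × Int)) (player : Int) (out : Bool) : Decidable (Spec_can_bear_off points player out) := by unfold Spec_can_bear_off; infer_instance

-- ===== CLAIM (what is proved, stated in full; the proofs are below) =====
def Claim_equal_can_bear_off : Prop := ∀ (points : List (Int × Int)) (player : Int), Dom_can_bear_off points player → Spec_can_bear_off points player (can_bear_off points player)

-- ===== LEMMAS AND PROOFS =====

theorem pv_foldl_shift (l : List (Int × Int)) (s : Int) :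
    l.foldl (fun s p => s + p.2) s = s + l.foldl (fun s p => s + p.2) 0 := by
  induction l generalizing s with
  | nil => simp
  | cons x xs ih => rw [List.foldl, List.foldl, ih (s + x.2), ih (0 + x.2)]; ring

-- A's loop, started at index i, equals B's slice decomposition shifted by i.
theorem pvLoopA_slice (player : Int) (lo hi : Nat) (hlh : lo ≤ hi)
    (hhome : ∀ i : Nat, pvHomeA player (i : Int) = decide (lo ≤ i ∧ i < hi)) :
    ∀ (l : List (Int × Int)) (i : Nat) (total : Int),
    pvLoopA player l (i : Int) total =
      if (l.take (lo - i) ++ l.drop (hi - i)).any (fun p => p.1 == player) then false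
      else (total +
          (((l.drop (lo - i)).take (hi - i - (lo - i))).filter (fun p => p.1 == player)).foldl
            (fun s p => s + p.2) 0) == 15
  | [], i, total => by simp [pvLoopA]
  | (owner, cnt) :: rest, i, total => by
    have hstep : ((i : Int) + 1) = ((i + 1 : Nat) : Int) := by push_cast; ring
    have IH := fun t => pvLoopA_slice player lo hi hlh hhome rest (i + 1) t
    by_cases hown : (owner == player) = true
    · by_cases hi_lt_lo : i < lo
      · -- prefix region: home test false, B sees an owned piece in the left slice
        have hh : pvHomeA player (i : Int) = false := by
          rw [hhome]; simp; omega
        have htake : ((owner, cnt) :: rest).take (lo - i) = (owner, cnt) :: rest.take (lo - i - 1) := by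
          rw [show lo - i = (lo - i - 1) + 1 by omega]; rfl
        simp only [pvLoopA]
        simp [hown, hh, htake]
      · by_cases hi_lt_hi : i < hi
        · -- home region: descend, piece counts into the home-slice sum
          have hh : pvHomeA player (i : Int) = true := by
            rw [hhome]; simp; omega
          have htake : ((owner, cnt) :: rest).take (lo - i) = [] := by
            rw [show lo - i = 0 by omega]; rfl
          have hdrop : ((owner, cnt) :: rest).drop (hi - i) = rest.drop (hi - i - 1) := by
            rw [show hi - i = (hi - i - 1) + 1 by omega]; rfl
          have hmid : ((((owner, cnt) :: rest).drop (lo - i)).take (hi - i - (lo - i)))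
              = (owner, cnt) :: rest.take (hi - i - 1) := by
            rw [show lo - i = 0 by omega, show hi - i - 0 = (hi - i - 1) + 1 by omega]; rfl
          simp only [pvLoopA]
          simp only [hown, hh, if_true, hstep, IH, htake, hdrop, hmid]
          have h1 : lo - (i + 1) = 0 := by omega
          have h2 : hi - (i + 1) = hi - i - 1 := by omega
          rw [h1, h2]
          simp only [List.take_zero, List.nil_append, List.drop_zero, Nat.sub_zero]
          by_cases hany : (rest.drop (hi - i - 1)).any (fun p => p.1 == player) = true
          · simp [hany]
          · simp only [Bool.not_eq_true] at hany
            simp only [hany, Bool.false_eq_true, if_false, List.filter_cons, hown, if_true,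
              List.foldl_cons]
            rw [pv_foldl_shift (List.filter (fun p => p.1 == player) (List.take (hi - i - 1) rest))
              (0 + (owner, cnt).2)]
            congr 1
            ring
        · -- suffix region: home test false, owned piece sits in the right slice
          have hh : pvHomeA player (i : Int) = false := by
            rw [hhome]; simp; omega
          have hdrop : hi - i = 0 := by omega
          have htake : lo - i = 0 := by omega
          simp only [pvLoopA]
          simp [hown, hh, hdrop, htake]
    · -- not the player's point: it vanishes from every slice aggregate
      have hown' : (owner == player) = false := by simpa using hown
      by_cases hi_lt_lo : i < lo
      · have htake : ((owner, cnt) :: rest).take (lo - i) = (owner, cnt) :: rest.take (lo - i - 1) := by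
          rw [show lo - i = (lo - i - 1) + 1 by omega]; rfl
        have hdrop : ((owner, cnt) :: rest).drop (hi - i) = rest.drop (hi - i - 1) := by
          rw [show hi - i = (hi - i - 1) + 1 by omega]; rfl
        have hmid : (((owner, cnt) :: rest).drop (lo - i)) = rest.drop (lo - i - 1) := by
          rw [show lo - i = (lo - i - 1) + 1 by omega]; rfl
        simp only [pvLoopA]
        simp only [hown', Bool.false_eq_true, if_false, hstep, IH, htake, hdrop, hmid]
        have h1 : lo - (i + 1) = lo - i - 1 := by omega
        have h2 : hi - (i + 1) = hi - i - 1 := by omega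
        have h3 : hi - i - (lo - i) = hi - i - 1 - (lo - i - 1) := by omega
        rw [h1, h2, h3]
        simp [hown']
      · by_cases hi_lt_hi : i < hi
        · have htake : lo - i = 0 := by omega
          have hdrop : ((owner, cnt) :: rest).drop (hi - i) = rest.drop (hi - i - 1) := by
            rw [show hi - i = (hi - i - 1) + 1 by omega]; rfl
          have hmid : ((owner, cnt) :: rest).take (hi - i) = (owner, cnt) :: rest.take (hi - i - 1) := by
            rw [show hi - i = (hi - i - 1) + 1 by omega]; rfl
          simp only [pvLoopA]
          simp only [hown', Bool.false_eq_true, if_false, hstep, IH, htake, hdrop, Nat.sub_zero, List.drop_zero, hmid]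
          have h1 : lo - (i + 1) = 0 := by omega
          have h2 : hi - (i + 1) = hi - i - 1 := by omega
          rw [h1, h2]
          simp [hown']
        · have htake : lo - i = 0 := by omega
          have hdrop : hi - i = 0 := by omega
          simp only [pvLoopA]
          simp only [hown', Bool.false_eq_true, if_false, hstep, IH, htake, hdrop]
          have h1 : lo - (i + 1) = 0 := by omega
          have h2 : hi - (i + 1) = 0 := by omega
          rw [h1, h2]
          simp [hown']

-- ===== VERDICT (by name: the statement is the Claim_ definition above) =====
theorem can_bear_off_spec : Claim_equal_can_bear_off := by
  intro points player _
  unfold Spec_can_bear_off can_bear_off can_bear_off_alt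
  by_cases hp : (player == 1) = true
  · have hhome : ∀ i : Nat, pvHomeA player (i : Int) = decide (0 ≤ i ∧ i < 6) := by
      intro i
      simp only [pvHomeA, hp, if_true]
      rw [decide_eq_decide]
      omega
    have key := pvLoopA_slice player 0 6 (by omega) hhome points 0 0
    simp only [Nat.sub_zero, Int.ofNat_zero] at key
    have s1 : PySem.List.slice points none (some (0:Int)) = List.take 0 points :=
      PySem.List.slice_to points (by decide)
    have s2 : PySem.List.slice points (some (6:Int)) none = List.drop 6 points :=
      PySem.List.slice_from points (by decide)
    have s3 : PySem.List.slice points none (some (6:Int)) = List.take 6 points :=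
      PySem.List.slice_to points (by decide)
    rw [key]
    simp [hp, s1, s2, s3]
  · have hp' : (player == 1) = false := by simpa using hp
    have hhome : ∀ i : Nat, pvHomeA player (i : Int) = decide (18 ≤ i ∧ i < 24) := by
      intro i
      simp only [pvHomeA, hp', Bool.false_eq_true, if_false]
      rw [decide_eq_decide]
      omega
    have key := pvLoopA_slice player 18 24 (by omega) hhome points 0 0
    simp only [Nat.sub_zero, Int.ofNat_zero] at key
    have s1 : PySem.List.slice points none (some (18:Int)) = List.take 18 points :=
      PySem.List.slice_to points (by decide)
    have s2 : PySem.List.slice points (some (24:Int)) none = List.drop 24 points :=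
      PySem.List.slice_from points (by decide)
    have s3 : PySem.List.slice points (some (18:Int)) (some (24:Int)) = List.take 6 (List.drop 18 points) :=
      PySem.List.slice_toNat points (by decide) (by decide)
    rw [key]
    simp [hp', s1, s2, s3]
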